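-- pv_equiv track=rewrite | github.com/Xiaoyu-Xing/algorithms | python/max_distance_with_flight_fuel.py | find_max_combination
-- ===== SOURCE A (Python) =====
-- def find_max_combination(list1, list2, maximum_capacity):
--     ans_index = []
--     curr_max = float('-inf')
--     for i, first in enumerate(list1):
--         for j, second in enumerate(list2):
--             if curr_max <= first + second <= maximum_capacity:
--                 if first + second > curr_max:
--                     curr_max = first + second
--                     ans_index.clear()  # ans_index = [] for python2
--                 # or ans_index.append([first, second])
--                 ans_index.append([i, j])
--     return ans_index
-- ===== SOURCE B (Python) =====
-- def find_max_combination(list1, list2, maximum_capacity):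
--     # Phase 1: find the best (largest) pair sum not exceeding the capacity.
--     best = None
--     for first in list1:
--         for second in list2:
--             s = first + second
--             if s <= maximum_capacity and (best is None or best < s):
--                 best = s
--     if best is None:
--         return []
--     # Phase 2: group list2 indices by value once, then collect matches by lookup.
--     index_of = {}
--     for j, second in enumerate(list2):
--         index_of.setdefault(second, []).append(j)
--     ans = []
--     for i, first in enumerate(list1):
--         for j in index_of.get(best - first, []):
--             ans.append([i, j])
--     return ans
-- ===== Notes on version B (the rewrite author's own statement) =====
-- stated objective: alternative
-- what changed: A interleaves a running maximum with clear/append bookkeeping on the answer list in one nested pass; B first computes the best qualifying sum with a pure max pass, then builds a value-to-indices dict over list2 once and collects each row's matches by a single dict lookup instead of an inner scan.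
import Mathlib
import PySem

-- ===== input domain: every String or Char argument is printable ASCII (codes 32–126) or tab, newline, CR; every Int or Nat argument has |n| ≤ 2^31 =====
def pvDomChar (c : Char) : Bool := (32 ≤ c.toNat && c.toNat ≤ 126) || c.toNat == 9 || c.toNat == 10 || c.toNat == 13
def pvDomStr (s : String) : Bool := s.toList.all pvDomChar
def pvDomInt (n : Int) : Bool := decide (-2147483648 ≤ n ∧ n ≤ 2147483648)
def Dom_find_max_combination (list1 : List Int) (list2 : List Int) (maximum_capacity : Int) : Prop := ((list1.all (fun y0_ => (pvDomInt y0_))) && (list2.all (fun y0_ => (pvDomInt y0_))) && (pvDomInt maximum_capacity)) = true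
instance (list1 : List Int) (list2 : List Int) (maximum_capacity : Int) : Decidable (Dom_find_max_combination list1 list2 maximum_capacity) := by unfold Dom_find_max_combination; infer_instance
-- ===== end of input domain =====

-- B replaces A's single interleaved pass (running max + clear/append bookkeeping) by a pure max
-- pass followed by a value→indices dict over list2 and per-row dict lookups (objective: alternative).

-- ===== PORT A =====
-- curr_max = float('-inf') is modeled exactly as Option Int with none = -inf (all compared values are ints)
def pvCmLe (cm : Option Int) (s : Int) : Bool :=
  match cm with
  | none => true
  | some c => decide (c ≤ s)

def pvCmLt (cm : Option Int) (s : Int) : Bool :=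
  match cm with
  | none => true
  | some c => decide (c < s)

-- the body of A's inner loop: st = (ans_index, curr_max), pq = ((i, first), (j, second))
def pvStepA (maximum_capacity : Int) (st : List (List Int) × Option Int)
    (pq : (Int × Int) × (Int × Int)) : List (List Int) × Option Int :=
  if pvCmLe st.2 (pq.1.2 + pq.2.2) && decide (pq.1.2 + pq.2.2 ≤ maximum_capacity) then
    if pvCmLt st.2 (pq.1.2 + pq.2.2) then ([[pq.1.1, pq.2.1]], some (pq.1.2 + pq.2.2))
    else (st.1 ++ [[pq.1.1, pq.2.1]], st.2)
  else st

def find_max_combination (list1 : List Int) (list2 : List Int) (maximum_capacity : Int) : List (List Int) :=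
  ((PySem.List.enumerate list1).foldl (fun st p =>
      (PySem.List.enumerate list2).foldl (fun st q => pvStepA maximum_capacity st (p, q)) st)
    ([], none)).1

-- ===== PORT B =====
-- the body of B's phase-1 test: 'if s <= maximum_capacity and (best is None or best < s): best = s'
def pvStepBest (maximum_capacity : Int) (b : Option Int) (s : Int) : Option Int :=
  if decide (s ≤ maximum_capacity) && (b.isNone || decide (b.getD 0 < s)) then some s else b

def find_max_combination_alt (list1 : List Int) (list2 : List Int) (maximum_capacity : Int) : List (List Int) :=
  let best := list1.foldl (fun b first =>
      list2.foldl (fun b second => pvStepBest maximum_capacity b (first + second)) b)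
    (none : Option Int)
  match best with
  | none => []
  | some bv =>
      -- index_of.setdefault(second, []).append(j)  ==  index_of[second] = index_of.get(second, []) + [j]
      let index_of := (PySem.List.enumerate list2).foldl
          (fun d q => d.modify q.2 [] (fun js => js ++ [q.1]))
          (PySem.Dict.empty : PySem.Dict Int (List Int))
      (PySem.List.enumerate list1).foldl
        (fun ans p => ans ++ (index_of.getD (bv - p.2) []).map (fun j => [p.1, j])) []

-- ===== PRECONDITION & SPEC =====
def Spec_find_max_combination (list1 : List Int) (list2 : List Int) (maximum_capacity : Int) (out : List (List Int)) : Prop := out = find_max_combination_alt list1 list2 maximum_capacity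
instance (list1 : List Int) (list2 : List Int) (maximum_capacity : Int) (out : List (List Int)) : Decidable (Spec_find_max_combination list1 list2 maximum_capacity out) := by unfold Spec_find_max_combination; infer_instance

-- ===== CLAIM (what is proved, stated in full; the proofs are below) =====
def Claim_equal_find_max_combination : Prop := ∀ (list1 : List Int) (list2 : List Int) (maximum_capacity : Int), Dom_find_max_combination list1 list2 maximum_capacity → Spec_find_max_combination list1 list2 maximum_capacity (find_max_combination list1 list2 maximum_capacity)

-- ===== LEMMAS AND PROOFS =====

def pvSum (pq : (Int × Int) × (Int × Int)) : Int := pq.1.2 + pq.2.2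

def pvPairs (list1 list2 : List Int) : List ((Int × Int) × (Int × Int)) :=
  (PySem.List.enumerate list1).flatMap (fun p => (PySem.List.enumerate list2).map (fun q => (p, q)))

def pvBest (cap : Int) (E : List ((Int × Int) × (Int × Int))) : Option Int :=
  E.foldl (fun b pq => pvStepBest cap b (pvSum pq)) none

def pvMatches (b : Option Int) (E : List ((Int × Int) × (Int × Int))) : List (List Int) :=
  E.filterMap (fun pq => if some (pvSum pq) = b then some [pq.1.1, pq.2.1] else none)

theorem pvStepBest_none (cap s : Int) :
    pvStepBest cap none s = if s ≤ cap then some s else none := by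
  by_cases h : s ≤ cap <;> simp [pvStepBest, h]

theorem pvStepBest_some (cap c0 s : Int) :
    pvStepBest cap (some c0) s = if s ≤ cap ∧ c0 < s then some s else some c0 := by
  by_cases h1 : s ≤ cap <;> by_cases h2 : c0 < s <;> simp [pvStepBest, h1, h2]

theorem pv_foldl_nested {α β σ : Type} (l1 : List α) (l2 : List β) (g : σ → α × β → σ) (init : σ) :
    l1.foldl (fun st p => l2.foldl (fun st q => g st (p, q)) st) init
      = (l1.flatMap (fun p => l2.map (fun q => (p, q)))).foldl g init := by
  induction l1 generalizing init with
  | nil => rfl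
  | cons a t ih => simp [List.foldl_append, List.foldl_map, ih]

theorem pvBest_append (cap : Int) (D : List ((Int × Int) × (Int × Int))) (x) :
    pvBest cap (D ++ [x]) = pvStepBest cap (pvBest cap D) (pvSum x) := by
  simp [pvBest, List.foldl_append]

theorem pvBest_none_max (cap : Int) (E : List ((Int × Int) × (Int × Int)))
    (h : pvBest cap E = none) : ∀ pq ∈ E, ¬ (pvSum pq ≤ cap) := by
  induction E using List.reverseRecOn with
  | nil => simp
  | append_singleton D x ih =>
      rw [pvBest_append] at h
      cases hD : pvBest cap D with
      | none =>
          rw [hD, pvStepBest_none] at h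
          by_cases hcap : pvSum x ≤ cap
          · rw [if_pos hcap] at h; exact absurd h (by simp)
          · intro pq hpq
            rcases List.mem_append.mp hpq with hDm | hxm
            · exact ih hD pq hDm
            · rw [List.mem_singleton.mp hxm]; exact hcap
      | some c0 =>
          rw [hD, pvStepBest_some] at h
          split at h <;> exact absurd h (by simp)

theorem pvBest_some_max (cap : Int) (E : List ((Int × Int) × (Int × Int))) :
    ∀ c, pvBest cap E = some c → c ≤ cap ∧ ∀ pq ∈ E, pvSum pq ≤ cap → pvSum pq ≤ c := by
  induction E using List.reverseRecOn with
  | nil => intro c h; simp [pvBest] at h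
  | append_singleton D x ih =>
      intro c h
      rw [pvBest_append] at h
      cases hD : pvBest cap D with
      | none =>
          rw [hD, pvStepBest_none] at h
          by_cases hcap : pvSum x ≤ cap
          · rw [if_pos hcap] at h
            obtain rfl : pvSum x = c := by simpa using h
            refine ⟨hcap, fun pq hpq hle => ?_⟩
            rcases List.mem_append.mp hpq with hDm | hxm
            · exact absurd hle (pvBest_none_max cap D hD pq hDm)
            · rw [List.mem_singleton.mp hxm]
          · rw [if_neg hcap] at h; exact absurd h (by simp)
      | some c0 =>
          rw [hD, pvStepBest_some] at h
          obtain ⟨hc0cap, hmax⟩ := ih c0 hD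
          by_cases hcl : pvSum x ≤ cap ∧ c0 < pvSum x
          · rw [if_pos hcl] at h
            obtain rfl : pvSum x = c := by simpa using h
            refine ⟨hcl.1, fun pq hpq hle => ?_⟩
            rcases List.mem_append.mp hpq with hDm | hxm
            · exact le_trans (hmax pq hDm hle) (le_of_lt hcl.2)
            · rw [List.mem_singleton.mp hxm]
          · rw [if_neg hcl] at h
            obtain rfl : c0 = c := by simpa using h
            refine ⟨hc0cap, fun pq hpq hle => ?_⟩
            rcases List.mem_append.mp hpq with hDm | hxm
            · exact hmax pq hDm hle
            · obtain rfl := List.mem_singleton.mp hxm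
              omega

theorem pvMatches_append (b : Option Int) (D : List ((Int × Int) × (Int × Int))) (x) :
    pvMatches b (D ++ [x])
      = pvMatches b D ++ (if some (pvSum x) = b then [[x.1.1, x.2.1]] else []) := by
  by_cases h : some (pvSum x) = b <;>
    simp [pvMatches, List.filterMap_append, h]

theorem pvMatches_none (E : List ((Int × Int) × (Int × Int))) : pvMatches none E = [] := by
  simp [pvMatches]

theorem pvMatches_empty_of_gt (cap : Int) (D : List ((Int × Int) × (Int × Int))) (s : Int)
    (hs : s ≤ cap) (h : ∀ pq ∈ D, pvSum pq ≤ cap → pvSum pq < s) :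
    pvMatches (some s) D = [] := by
  rw [pvMatches, List.filterMap_eq_nil_iff]
  intro pq hpq
  have hne : ¬ (some (pvSum pq) = some s) := by
    simp only [Option.some.injEq]
    intro he
    subst he
    have := h pq hpq hs
    omega
  rw [if_neg hne]

theorem pvA_fold (cap : Int) (E : List ((Int × Int) × (Int × Int))) :
    E.foldl (pvStepA cap) ([], none) = (pvMatches (pvBest cap E) E, pvBest cap E) := by
  induction E using List.reverseRecOn with
  | nil => simp [pvBest, pvMatches]
  | append_singleton D x ih =>
      rw [List.foldl_append, ih, pvBest_append, pvMatches_append]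
      by_cases hcap : pvSum x ≤ cap
      · have hcap' : x.1.2 + x.2.2 ≤ cap := hcap
        cases hD : pvBest cap D with
        | none =>
            rw [pvStepBest_none, if_pos hcap]
            have hempty : pvMatches (some (pvSum x)) D = [] :=
              pvMatches_empty_of_gt cap D (pvSum x) hcap
                (fun pq hpq hle => absurd hle (pvBest_none_max cap D hD pq hpq))
            rw [pvMatches_none, hempty]
            simp [pvStepA, pvCmLe, pvCmLt, pvSum, hcap']
        | some c0 =>
            obtain ⟨hc0cap, hmax⟩ := pvBest_some_max cap D c0 hD
            rw [pvStepBest_some]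
            rcases lt_trichotomy c0 (pvSum x) with hlt | heq | hgt
            · have hlt' : c0 < x.1.2 + x.2.2 := hlt
              rw [if_pos ⟨hcap, hlt⟩]
              have hempty : pvMatches (some (pvSum x)) D = [] :=
                pvMatches_empty_of_gt cap D (pvSum x) hcap
                  (fun pq hpq hle => lt_of_le_of_lt (hmax pq hpq hle) hlt)
              rw [hempty]
              simp [pvStepA, pvCmLe, pvCmLt, pvSum, hcap', hlt', le_of_lt hlt']
            · have heq' : c0 = x.1.2 + x.2.2 := heq
              rw [if_neg (by omega)]
              simp [pvStepA, pvCmLe, pvCmLt, pvSum, hcap', heq']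
            · have hgt' : x.1.2 + x.2.2 < c0 := hgt
              rw [if_neg (by omega)]
              simp [pvStepA, pvCmLe, pvSum, hcap', not_le.mpr hgt']
              omega
      · have hcap' : ¬ (x.1.2 + x.2.2 ≤ cap) := hcap
        cases hD : pvBest cap D with
        | none =>
            rw [pvStepBest_none, if_neg hcap]
            simp [pvStepA, pvCmLe, pvSum, hcap']
        | some c0 =>
            obtain ⟨hc0cap, _⟩ := pvBest_some_max cap D c0 hD
            rw [pvStepBest_some, if_neg (by omega)]
            simp [pvStepA, pvCmLe, pvSum, hcap']
            omega

theorem pv_filterMap_flatMap {α β γ : Type} (l : List α) (g : α → List β) (h : β → Option γ) :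
    (l.flatMap g).filterMap h = l.flatMap (fun x => (g x).filterMap h) := by
  induction l with
  | nil => rfl
  | cons a t ih => simp [List.filterMap_append, ih]

theorem pv_inner (E : List (Int × Int)) (i first bv : Int) :
    E.filterMap (fun q => if first + q.2 = bv then some [i, q.1] else none)
      = (((E.map (fun q => (q.2, q.1))).filter (fun r => r.1 == bv - first)).map
          (fun r => r.2)).map (fun j => [i, j]) := by
  induction E with
  | nil => rfl
  | cons q t ih =>
      simp only [List.filterMap_cons, List.map_cons, List.filter_cons]
      by_cases h : first + q.2 = bv
      · have hb : (q.2 == bv - first) = true := by simp; omega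
        simp [h, hb, ih]
      · have hb : (q.2 == bv - first) = false := by simp; omega
        simp [h, hb, ih]

theorem pvA_eq_matches (list1 list2 : List Int) (cap : Int) :
    find_max_combination list1 list2 cap
      = pvMatches (pvBest cap (pvPairs list1 list2)) (pvPairs list1 list2) := by
  unfold find_max_combination
  rw [pv_foldl_nested _ _ (pvStepA cap)]
  rw [pvA_fold]
  rfl

theorem pvPairs_map_vals (list1 list2 : List Int) :
    (pvPairs list1 list2).map (fun pq => (pq.1.2, pq.2.2))
      = list1.flatMap (fun f => list2.map (fun sec => (f, sec))) := by
  conv_rhs => rw [← PySem.List.map_snd_enumerate list1 0, ← PySem.List.map_snd_enumerate list2 0]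
  rw [List.flatMap_map]
  unfold pvPairs
  rw [List.map_flatMap]
  refine congrArg (fun f => List.flatMap f (PySem.List.enumerate list1)) (funext fun p => ?_)
  have hcomp : ((fun pq : (Int × Int) × (Int × Int) => (pq.1.2, pq.2.2)) ∘ fun q => (p, q))
      = (fun sec : Int => (p.2, sec)) ∘ (fun q : Int × Int => q.2) := rfl
  simp only [List.map_map]
  exact congrArg (fun f => List.map f (PySem.List.enumerate list2)) hcomp

theorem pvB_best (list1 list2 : List Int) (cap : Int) :
    list1.foldl (fun b first =>
        list2.foldl (fun b second => pvStepBest cap b (first + second)) b) (none : Option Int)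
      = pvBest cap (pvPairs list1 list2) := by
  refine (pv_foldl_nested list1 list2
      (fun b (pr : Int × Int) => pvStepBest cap b (pr.1 + pr.2)) none).trans ?_
  rw [← pvPairs_map_vals, List.foldl_map]
  rfl

theorem pv_idx (list2 : List Int) (v : Int) :
    ((PySem.List.enumerate list2).foldl (fun d q => d.modify q.2 [] (fun js => js ++ [q.1]))
        (PySem.Dict.empty : PySem.Dict Int (List Int))).getD v []
      = (((PySem.List.enumerate list2).map (fun q => (q.2, q.1))).filter
          (fun r => r.1 == v)).map (fun r => r.2) := by
  have h : (PySem.List.enumerate list2).foldl (fun d q => d.modify q.2 [] (fun js => js ++ [q.1]))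
        (PySem.Dict.empty : PySem.Dict Int (List Int))
      = ((PySem.List.enumerate list2).map (fun q => (q.2, q.1))).foldl
          (fun d p => d.modify p.1 [] (fun js => js ++ [p.2])) PySem.Dict.empty := by
    rw [List.foldl_map]
  rw [h, PySem.Dict.getD_foldl_modify_append, PySem.Dict.getD_empty]
  simp

theorem pvB_out (list1 list2 : List Int) (bv : Int) :
    (PySem.List.enumerate list1).foldl
        (fun ans p => ans ++
          ((((PySem.List.enumerate list2).foldl
              (fun d q => d.modify q.2 [] (fun js => js ++ [q.1]))
              (PySem.Dict.empty : PySem.Dict Int (List Int))).getD (bv - p.2) []).map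
            (fun j => [p.1, j]))) []
      = pvMatches (some bv) (pvPairs list1 list2) := by
  rw [PySem.List.foldl_append_eq_flatMap]
  unfold pvMatches pvPairs
  rw [pv_filterMap_flatMap]
  simp only [List.nil_append]
  refine congrArg (fun f => List.flatMap f (PySem.List.enumerate list1)) (funext fun p => ?_)
  rw [pv_idx, List.filterMap_map, ← pv_inner]
  refine List.filterMap_congr (fun q hq => ?_)
  by_cases h : p.2 + q.2 = bv <;> simp [pvSum, Function.comp, h]

-- ===== VERDICT (by name: the statement is the Claim_ definition above) =====
theorem find_max_combination_spec : Claim_equal_find_max_combination := by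
  intro list1 list2 cap _
  unfold Spec_find_max_combination
  rw [pvA_eq_matches]
  simp only [find_max_combination_alt]
  rw [pvB_best]
  cases hB : pvBest cap (pvPairs list1 list2) with
  | none => rw [pvMatches_none]
  | some bv => rw [← pvB_out list1 list2 bv]
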